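-- pv_equiv track=rewrite | github.com/aravindas4/snippetbox-1 | leets/magic_num.py | solve
-- ===== SOURCE A (Python) =====
-- def solve(A):
--     d = 0
--     power = 1
--     while A > 0:
--         rem = A % 2
--         A = A // 2
--         d += (rem * power)
--         power *= 10
--
--     power = 5
--     ans = 0
--     while d > 0:
--         rem = d % 10
--         ans += (power * rem)
--         power *= 5
--         d = d // 10
--
--     return ans
-- ===== SOURCE B (Python) =====
-- def solve(A):
--     ans = 0
--     power = 5
--     while A > 0:
--         rem = A % 2
--         ans += power * rem
--         power *= 5
--         A = A // 2
--     return ans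
-- ===== Notes on version B (the rewrite author's own statement) =====
-- stated objective: simpler
-- what changed: B reads A's bits once and accumulates each bit's power-of-five contribution directly, eliminating A's intermediate decimal-encoding number d and the whole second digit-reading loop.
import Mathlib
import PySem

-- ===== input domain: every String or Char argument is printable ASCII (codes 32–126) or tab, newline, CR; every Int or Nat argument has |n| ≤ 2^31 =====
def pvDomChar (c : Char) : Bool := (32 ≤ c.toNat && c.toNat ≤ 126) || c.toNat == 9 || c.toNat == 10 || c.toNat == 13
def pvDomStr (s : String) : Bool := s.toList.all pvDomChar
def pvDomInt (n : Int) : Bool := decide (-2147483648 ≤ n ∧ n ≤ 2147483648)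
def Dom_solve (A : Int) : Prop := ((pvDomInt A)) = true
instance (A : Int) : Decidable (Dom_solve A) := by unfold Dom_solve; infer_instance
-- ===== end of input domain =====

-- ===== PORT A =====
-- B collapses A's two passes (binary→decimal encoding d, then decimal→answer) into one
-- accumulating pass over A's bits; equivalence proved on the return value; objective: simpler.

-- while A > 0: rem = A % 2; A = A // 2; d += rem * power; power *= 10
def solveLoop1 (A d power : Int) : Int :=
  if h : A > 0 then
    solveLoop1 (PySem.Int.floordiv A 2) (d + PySem.Int.mod A 2 * power) (power * 10)
  else d
termination_by A.toNat
decreasing_by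
  have h2 : PySem.Int.floordiv A 2 = A / 2 := PySem.Int.floordiv_eq_ediv_of_pos (by omega)
  rw [h2]; omega

-- while d > 0: rem = d % 10; ans += power * rem; power *= 5; d = d // 10
def solveLoop2 (d power ans : Int) : Int :=
  if h : d > 0 then
    solveLoop2 (PySem.Int.floordiv d 10) (power * 5) (ans + power * PySem.Int.mod d 10)
  else ans
termination_by d.toNat
decreasing_by
  have h2 : PySem.Int.floordiv d 10 = d / 10 := PySem.Int.floordiv_eq_ediv_of_pos (by omega)
  rw [h2]; omega

def solve (A : Int) : Int := solveLoop2 (solveLoop1 A 0 1) 5 0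

-- ===== PORT B =====
-- while A > 0: rem = A % 2; ans += power * rem; power *= 5; A = A // 2
def solveAltLoop (A ans power : Int) : Int :=
  if h : A > 0 then
    solveAltLoop (PySem.Int.floordiv A 2) (ans + power * PySem.Int.mod A 2) (power * 5)
  else ans
termination_by A.toNat
decreasing_by
  have h2 : PySem.Int.floordiv A 2 = A / 2 := PySem.Int.floordiv_eq_ediv_of_pos (by omega)
  rw [h2]; omega

def solve_alt (A : Int) : Int := solveAltLoop A 0 5

-- ===== PRECONDITION & SPEC =====
def Spec_solve (A : Int) (out : Int) : Prop := out = solve_alt A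
instance (A : Int) (out : Int) : Decidable (Spec_solve A out) := by unfold Spec_solve; infer_instance

-- ===== CLAIM (what is proved, stated in full; the proofs are below) =====
def Claim_equal_solve : Prop := ∀ (A : Int), Dom_solve A → Spec_solve A (solve A)

-- ===== LEMMAS AND PROOFS =====

-- g A : the intermediate decimal number built by A's first loop (bits written as decimal digits)
def pvG (A : Int) : Int :=
  if h : A > 0 then A % 2 + 10 * pvG (A / 2) else 0
termination_by A.toNat
decreasing_by omega

-- f A : value of the magic number, recursively over the bits of A
def pvF (A : Int) : Int :=
  if h : A > 0 then 5 * (A % 2) + 5 * pvF (A / 2) else 0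
termination_by A.toNat
decreasing_by omega

theorem pvG_nonneg (A : Int) : 0 ≤ pvG A := by
  induction A using pvG.induct with
  | case1 A h ih => rw [pvG, dif_pos h]; omega
  | case2 A h => rw [pvG, dif_neg h]

theorem pvG_pos (A : Int) : 0 < A → 0 < pvG A := by
  induction A using pvG.induct with
  | case1 A h ih =>
    intro _
    have hGA : pvG A = A % 2 + 10 * pvG (A / 2) := by rw [pvG, dif_pos h]
    have hg2 : 0 ≤ pvG (A / 2) := pvG_nonneg (A / 2)
    by_cases h2 : 0 < A / 2
    · have := ih h2; omega
    · omega
  | case2 A h => intro h'; omega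

theorem solveLoop1_eq (A : Int) : ∀ d power : Int,
    solveLoop1 A d power = d + power * pvG A := by
  induction A using pvG.induct with
  | case1 A h ih =>
    intro d power
    have hGA : pvG A = A % 2 + 10 * pvG (A / 2) := by rw [pvG, dif_pos h]
    rw [solveLoop1, dif_pos h,
      PySem.Int.floordiv_eq_ediv_of_pos (show (0:Int) < 2 by omega),
      PySem.Int.mod_eq_emod_of_pos (show (0:Int) < 2 by omega), ih, hGA]
    ring
  | case2 A h =>
    intro d power
    rw [solveLoop1, dif_neg h, pvG, dif_neg h]
    ring

-- A's second loop reads the bits of A back out of the decimal digits of pvG A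
theorem solveLoop2_pvG (A : Int) : ∀ q ans : Int,
    solveLoop2 (pvG A) (5 * q) ans = ans + q * pvF A := by
  induction A using pvG.induct with
  | case1 A h ih =>
    intro q ans
    have hg2 : 0 ≤ pvG (A / 2) := pvG_nonneg (A / 2)
    have hm : 0 ≤ A % 2 ∧ A % 2 < 2 := ⟨Int.emod_nonneg A (by omega), Int.emod_lt_of_pos A (by omega)⟩
    have hgpos : 0 < pvG A := pvG_pos A h
    have hGA : pvG A = A % 2 + 10 * pvG (A / 2) := by rw [pvG, dif_pos h]
    have hFA : pvF A = 5 * (A % 2) + 5 * pvF (A / 2) := by rw [pvF, dif_pos h]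
    have hdig : pvG A % 10 = A % 2 := by omega
    have hquo : pvG A / 10 = pvG (A / 2) := by omega
    have h25 : (5 * q) * 5 = 5 * (5 * q) := by ring
    rw [solveLoop2, dif_pos hgpos,
      PySem.Int.floordiv_eq_ediv_of_pos (show (0:Int) < 10 by omega),
      PySem.Int.mod_eq_emod_of_pos (show (0:Int) < 10 by omega),
      hdig, hquo, h25, ih, hFA]
    ring
  | case2 A h =>
    intro q ans
    rw [pvG, dif_neg h, solveLoop2, dif_neg (by omega : ¬ (0:Int) < 0), pvF, dif_neg h]
    ring

theorem solveAltLoop_eq5 (A : Int) : ∀ ans q : Int,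
    solveAltLoop A ans (5 * q) = ans + q * pvF A := by
  induction A using pvF.induct with
  | case1 A h ih =>
    intro ans q
    have hFA : pvF A = 5 * (A % 2) + 5 * pvF (A / 2) := by rw [pvF, dif_pos h]
    have h25 : (5 * q) * 5 = 5 * (5 * q) := by ring
    rw [solveAltLoop, dif_pos h,
      PySem.Int.floordiv_eq_ediv_of_pos (show (0:Int) < 2 by omega),
      PySem.Int.mod_eq_emod_of_pos (show (0:Int) < 2 by omega),
      h25, ih, hFA]
    ring
  | case2 A h =>
    intro ans q
    rw [solveAltLoop, dif_neg h, pvF, dif_neg h]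
    ring

-- ===== VERDICT (by name: the statement is the Claim_ definition above) =====
theorem solve_spec : Claim_equal_solve := by
  intro A _
  show solve A = solve_alt A
  have h5 : (5:Int) = 5 * 1 := by ring
  rw [solve, solve_alt, solveLoop1_eq, h5, solveAltLoop_eq5]
  have hg : (0:Int) + 1 * pvG A = pvG A := by ring
  rw [hg, solveLoop2_pvG]
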